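-- pv_equiv track=rewrite | github.com/vvivivivv/SC2079-MDP-Group-24 | algorithm_v4/algo/algo.py | _compress_commands
-- ===== SOURCE A (Python) =====
-- def _compress_commands(commands):
--     """Merge consecutive FW/BW commands."""
--     if not commands:
--         return commands
--     compressed = [commands[0]]
--     for i in range(1, len(commands)):
--         cmd = commands[i]
--         prev = compressed[-1]
--         if (cmd.startswith("FW") and prev.startswith("FW")
--                 and not cmd.startswith("FIN")):
--             try:
--                 pv, cv = int(prev[2:]), int(cmd[2:])
--                 if pv + cv <= 90:
--                     compressed[-1] = f"FW{pv + cv}"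
--                     continue
--             except ValueError:
--                 pass
--         elif cmd.startswith("BW") and prev.startswith("BW"):
--             try:
--                 pv, cv = int(prev[2:]), int(cmd[2:])
--                 if pv + cv <= 90:
--                     compressed[-1] = f"BW{pv + cv}"
--                     continue
--             except ValueError:
--                 pass
--         compressed.append(cmd)
--     return compressed
-- ===== SOURCE B (Python) =====
-- from itertools import groupby
--
--
-- def _key(c):
--     if c.startswith("FW"):
--         return "FW"
--     if c.startswith("BW"):
--         return "BW"
--     return None
--
--
-- def _compress_commands(commands):
--     """Merge consecutive FW/BW commands (group-then-fold decomposition)."""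
--     out = []
--     for k, grp in groupby(commands, _key):
--         grp = list(grp)
--         if k is None:
--             out.extend(grp)
--             continue
--         acc = grp[0]
--         for cmd in grp[1:]:
--             merged = None
--             try:
--                 s = int(acc[2:]) + int(cmd[2:])
--                 if s <= 90:
--                     merged = f"{k}{s}"
--             except ValueError:
--                 pass
--             if merged is None:
--                 out.append(acc)
--                 acc = cmd
--             else:
--                 acc = merged
--         out.append(acc)
--     return out
-- ===== Notes on version B (the rewrite author's own statement) =====
-- stated objective: alternative
-- what changed: Replaces A's per-element prefix branching on the running last output with a groupby-style decomposition: commands are first split into maximal consecutive runs sharing a direction key (FW/BW/other), non-movement runs are emitted unchanged, and each movement run is folded with an accumulator that merges while both parts parse as int and the sum stays <= 90.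
import Mathlib
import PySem

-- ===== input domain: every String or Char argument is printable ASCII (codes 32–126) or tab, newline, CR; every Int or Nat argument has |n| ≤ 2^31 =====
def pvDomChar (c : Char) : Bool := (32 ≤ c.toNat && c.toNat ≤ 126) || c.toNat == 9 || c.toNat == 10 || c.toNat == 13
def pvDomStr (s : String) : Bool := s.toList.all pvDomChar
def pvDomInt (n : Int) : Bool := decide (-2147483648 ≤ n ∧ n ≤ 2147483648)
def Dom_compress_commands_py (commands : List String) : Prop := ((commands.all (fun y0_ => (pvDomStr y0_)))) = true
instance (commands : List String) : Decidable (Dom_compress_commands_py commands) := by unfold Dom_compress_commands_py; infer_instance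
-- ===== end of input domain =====

-- B replaces A's per-element prefix branching by a group-then-fold decomposition (itertools.groupby on a
-- direction key, then a fold merging inside each movement group); objective: alternative, same cost.

-- ===== PORT A =====
-- prev = compressed[-1]; the loop body of A (try/except int(...) ported as Option match)
def pvStepAux (compressedRev : List String) (cmd prev : String) : List String :=
  if PySem.Str.startswith cmd "FW" && PySem.Str.startswith prev "FW"
      && !PySem.Str.startswith cmd "FIN" then
    match PySem.Int.ofStr? (PySem.Str.slice prev (some 2) none),
          PySem.Int.ofStr? (PySem.Str.slice cmd (some 2) none) with
    | some pv, some cv =>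
      if pv + cv ≤ 90 then ("FW" ++ PySem.Int.toStr (pv + cv)) :: compressedRev.tail
      else cmd :: compressedRev
    | _, _ => cmd :: compressedRev
  else if PySem.Str.startswith cmd "BW" && PySem.Str.startswith prev "BW" then
    match PySem.Int.ofStr? (PySem.Str.slice prev (some 2) none),
          PySem.Int.ofStr? (PySem.Str.slice cmd (some 2) none) with
    | some pv, some cv =>
      if pv + cv ≤ 90 then ("BW" ++ PySem.Int.toStr (pv + cv)) :: compressedRev.tail
      else cmd :: compressedRev
    | _, _ => cmd :: compressedRev
  else cmd :: compressedRev

def pvStepA (compressedRev : List String) (cmd : String) : List String :=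
  pvStepAux compressedRev cmd (compressedRev.headD "")

def compress_commands_py (commands : List String) : List String :=
  match commands with
  | [] => commands
  | c0 :: rest => (rest.foldl pvStepA [c0]).reverse

-- ===== PORT B =====
def pvKey (c : String) : Option String :=
  if PySem.Str.startswith c "FW" then some "FW"
  else if PySem.Str.startswith c "BW" then some "BW"
  else none

-- itertools.groupby: maximal consecutive runs with equal key
def pvGroupRuns : List String → List (Option String × List String)
  | [] => []
  | c :: cs =>
    (pvKey c, c :: cs.takeWhile (fun x => pvKey x == pvKey c)) ::
      pvGroupRuns (cs.dropWhile (fun x => pvKey x == pvKey c))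
termination_by l => l.length
decreasing_by
  simp only [List.length_cons]
  exact Nat.lt_succ_of_le (List.length_dropWhile_le _ _)

-- merged value (or None) of two commands of a movement group with key k
def pvMergeB (k acc cmd : String) : Option String :=
  match PySem.Int.ofStr? (PySem.Str.slice acc (some 2) none),
        PySem.Int.ofStr? (PySem.Str.slice cmd (some 2) none) with
  | some pv, some cv => if pv + cv ≤ 90 then some (k ++ PySem.Int.toStr (pv + cv)) else none
  | _, _ => none

-- B's inner fold over a movement group, acc = current accumulated command
def pvFuseB (k acc : String) : List String → List String
  | [] => [acc]
  | c :: cs =>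
    match pvMergeB k acc c with
    | some m => pvFuseB k m cs
    | none => acc :: pvFuseB k c cs

def pvProcessGroup : Option String × List String → List String
  | (none, g) => g
  | (some _, []) => []
  | (some k, g0 :: gs) => pvFuseB k g0 gs

def compress_commands_py_alt (commands : List String) : List String :=
  ((pvGroupRuns commands).map pvProcessGroup).flatten

-- ===== PRECONDITION & SPEC =====
def Spec_compress_commands_py (commands : List String) (out : List String) : Prop := out = compress_commands_py_alt commands
instance (commands : List String) (out : List String) : Decidable (Spec_compress_commands_py commands out) := by unfold Spec_compress_commands_py; infer_instance

-- ===== CLAIM (what is proved, stated in full; the proofs are below) =====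
def Claim_equal_compress_commands_py : Prop := ∀ (commands : List String), Dom_compress_commands_py commands → Spec_compress_commands_py commands (compress_commands_py commands)

-- ===== LEMMAS AND PROOFS =====

-- A's merge decision, extracted as an Option
def pvMergeA (prev cmd : String) : Option String :=
  if PySem.Str.startswith cmd "FW" && PySem.Str.startswith prev "FW"
      && !PySem.Str.startswith cmd "FIN" then
    match PySem.Int.ofStr? (PySem.Str.slice prev (some 2) none),
          PySem.Int.ofStr? (PySem.Str.slice cmd (some 2) none) with
    | some pv, some cv => if pv + cv ≤ 90 then some ("FW" ++ PySem.Int.toStr (pv + cv)) else none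
    | _, _ => none
  else if PySem.Str.startswith cmd "BW" && PySem.Str.startswith prev "BW" then
    match PySem.Int.ofStr? (PySem.Str.slice prev (some 2) none),
          PySem.Int.ofStr? (PySem.Str.slice cmd (some 2) none) with
    | some pv, some cv => if pv + cv ≤ 90 then some ("BW" ++ PySem.Int.toStr (pv + cv)) else none
    | _, _ => none
  else none

-- A's loop fused into direct recursion
def pvFuse (acc : String) : List String → List String
  | [] => [acc]
  | c :: cs =>
    match pvMergeA acc c with
    | some m => pvFuse m cs
    | none => acc :: pvFuse c cs

def pvFuseAll : List String → List String
  | [] => []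
  | c :: cs => pvFuse c cs

lemma pvFuse_cons (acc c : String) (cs : List String) :
    pvFuse acc (c :: cs) =
      match pvMergeA acc c with
      | some m => pvFuse m cs
      | none => acc :: pvFuse c cs := by
  rw [pvFuse]

lemma pvFuseB_cons (k acc c : String) (cs : List String) :
    pvFuseB k acc (c :: cs) =
      match pvMergeB k acc c with
      | some m => pvFuseB k m cs
      | none => acc :: pvFuseB k c cs := by
  rw [pvFuseB]

lemma stepA_eq (acc : String) (pre : List String) (cmd : String) :
    pvStepA (acc :: pre) cmd =
      match pvMergeA acc cmd with
      | some m => m :: pre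
      | none => cmd :: acc :: pre := by
  have h0 : pvStepA (acc :: pre) cmd = pvStepAux (acc :: pre) cmd acc := rfl
  rw [h0]
  unfold pvStepAux pvMergeA
  generalize PySem.Int.ofStr? (PySem.Str.slice acc (some 2) none) = oa
  generalize PySem.Int.ofStr? (PySem.Str.slice cmd (some 2) none) = oc
  split
  · cases oa with
    | none => rfl
    | some pv =>
      cases oc with
      | none => rfl
      | some cv =>
        by_cases hle : pv + cv ≤ 90
        · simp only [if_pos hle]; rfl
        · simp only [if_neg hle]
  · split
    · cases oa with
      | none => rfl
      | some pv =>
        cases oc with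
        | none => rfl
        | some cv =>
          by_cases hle : pv + cv ≤ 90
          · simp only [if_pos hle]; rfl
          · simp only [if_neg hle]
    · rfl

lemma foldA_eq (rest : List String) : ∀ (acc : String) (pre : List String),
    (rest.foldl pvStepA (acc :: pre)).reverse = pre.reverse ++ pvFuse acc rest := by
  induction rest with
  | nil => intro acc pre; simp [pvFuse]
  | cons c cs ih =>
    intro acc pre
    simp only [List.foldl_cons, stepA_eq, pvFuse]
    cases h : pvMergeA acc c with
    | some m => simp [ih]
    | none => simp [ih]

lemma startswith_string_iff (s p : String) :
    PySem.Str.startswith s p = true ↔ p.toList <+: s.toList := by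
  rw [← PySem.Chars.startswith_iff]
  simp

lemma not_FW_of_BW (c : String) (h : PySem.Str.startswith c "BW" = true) :
    PySem.Str.startswith c "FW" = false := by
  rw [startswith_string_iff] at h
  obtain ⟨t, ht⟩ := h
  rw [Bool.eq_false_iff]
  intro hf
  rw [startswith_string_iff, ← ht] at hf
  obtain ⟨u, hu⟩ := hf
  simp at hu

lemma not_FIN_of_FW (c : String) (h : PySem.Str.startswith c "FW" = true) :
    PySem.Str.startswith c "FIN" = false := by
  rw [startswith_string_iff] at h
  obtain ⟨t, ht⟩ := h
  rw [Bool.eq_false_iff]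
  intro hf
  rw [startswith_string_iff, ← ht] at hf
  obtain ⟨u, hu⟩ := hf
  simp at hu

lemma key_FW_iff (c : String) : pvKey c = some "FW" ↔ PySem.Str.startswith c "FW" = true := by
  unfold pvKey
  constructor
  · intro h
    split at h
    · assumption
    · split at h <;> simp_all
  · intro h
    rw [if_pos h]

lemma key_BW_iff (c : String) :
    pvKey c = some "BW" ↔ PySem.Str.startswith c "BW" = true := by
  unfold pvKey
  constructor
  · intro h
    split at h
    · simp_all
    · split at h <;> simp_all
  · intro h
    rw [if_neg (by rw [not_FW_of_BW c h]; simp), if_pos h]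

lemma key_cases (c : String) (k : String) (h : pvKey c = some k) : k = "FW" ∨ k = "BW" := by
  unfold pvKey at h
  split at h
  · exact Or.inl (Option.some.inj h).symm
  · split at h
    · exact Or.inr (Option.some.inj h).symm
    · exact absurd h (by simp)

lemma key_none_no_sw (c : String) (h : pvKey c = none) :
    PySem.Str.startswith c "FW" = false ∧ PySem.Str.startswith c "BW" = false := by
  unfold pvKey at h
  split at h
  · simp_all
  · split at h <;> simp_all

lemma mergeA_none_of_prev_none (prev cmd : String) (h : pvKey prev = none) :
    pvMergeA prev cmd = none := by
  obtain ⟨h1, h2⟩ := key_none_no_sw prev h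
  unfold pvMergeA
  rw [if_neg (by rw [h1]; simp), if_neg (by rw [h2]; simp)]

lemma mergeA_none_of_key_ne (prev cmd : String) (h : pvKey prev ≠ pvKey cmd) :
    pvMergeA prev cmd = none := by
  unfold pvMergeA
  split
  · rename_i hc
    simp only [Bool.and_eq_true] at hc
    exact absurd (((key_FW_iff prev).2 hc.1.2).trans ((key_FW_iff cmd).2 hc.1.1).symm) h
  · split
    · rename_i hc
      simp only [Bool.and_eq_true] at hc
      exact absurd (((key_BW_iff prev).2 hc.2).trans ((key_BW_iff cmd).2 hc.1).symm) h
    · rfl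

lemma mergeA_eq_mergeB (k prev cmd : String) (hk : k = "FW" ∨ k = "BW")
    (hp : pvKey prev = some k) (hc : pvKey cmd = some k) :
    pvMergeA prev cmd = pvMergeB k prev cmd := by
  rcases hk with rfl | rfl
  · rw [key_FW_iff] at hp hc
    unfold pvMergeA pvMergeB
    rw [if_pos (by rw [hp, hc, not_FIN_of_FW cmd hc]; rfl)]
  · rw [key_BW_iff] at hp hc
    unfold pvMergeA pvMergeB
    rw [if_neg (by rw [not_FW_of_BW cmd hc]; simp), if_pos (by rw [hp, hc]; rfl)]

lemma key_append (k : String) (hk : k = "FW" ∨ k = "BW") (x : String) :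
    pvKey (k ++ x) = some k := by
  have hsw : PySem.Str.startswith (k ++ x) k = true := by
    rw [startswith_string_iff]
    simp only [String.toList_append]
    exact List.prefix_append _ _
  rcases hk with rfl | rfl
  · exact (key_FW_iff _).2 hsw
  · exact (key_BW_iff _).2 hsw

lemma mergeB_key (k prev cmd m : String) (hk : k = "FW" ∨ k = "BW")
    (h : pvMergeB k prev cmd = some m) : pvKey m = some k := by
  unfold pvMergeB at h
  generalize PySem.Int.ofStr? (PySem.Str.slice prev (some 2) none) = oa at h
  generalize PySem.Int.ofStr? (PySem.Str.slice cmd (some 2) none) = oc at h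
  cases oa with
  | none => exact absurd h (by simp)
  | some pv =>
    cases oc with
    | none => exact absurd h (by simp)
    | some cv =>
      replace h : (if pv + cv ≤ 90 then some (k ++ PySem.Int.toStr (pv + cv)) else none)
          = some m := h
      by_cases hle : pv + cv ≤ 90
      · rw [if_pos hle] at h
        rw [← Option.some.inj h]
        exact key_append k hk _
      · rw [if_neg hle] at h
        exact absurd h (by simp)

lemma fuse_group (g : List String) : ∀ (acc k : String) (rest : List String),
    (k = "FW" ∨ k = "BW") → pvKey acc = some k →
    (∀ x ∈ g, pvKey x = some k) →
    (∀ r rs, rest = r :: rs → pvKey r ≠ some k) →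
    pvFuse acc (g ++ rest) = pvFuseB k acc g ++ pvFuseAll rest := by
  induction g with
  | nil =>
    intro acc k rest hk hacc _ hrest
    cases rest with
    | nil => simp [pvFuse, pvFuseB, pvFuseAll]
    | cons r rs =>
      have hnm : pvMergeA acc r = none := by
        apply mergeA_none_of_key_ne
        rw [hacc]
        exact fun h => hrest r rs rfl h.symm
      rw [List.nil_append, pvFuse_cons, hnm]
      rfl
  | cons c g' ih =>
    intro acc k rest hk hacc hg hrest
    have hc : pvKey c = some k := hg c (by simp)
    have hm : pvMergeA acc c = pvMergeB k acc c := mergeA_eq_mergeB k acc c hk hacc hc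
    rw [List.cons_append, pvFuse_cons, pvFuseB_cons, hm]
    cases h : pvMergeB k acc c with
    | some m =>
      exact ih m k rest hk (mergeB_key k acc c m hk h) (fun x hx => hg x (List.mem_cons_of_mem _ hx)) hrest
    | none =>
      rw [ih c k rest hk hc (fun x hx => hg x (List.mem_cons_of_mem _ hx)) hrest]
      rfl

lemma fuse_none_group (g : List String) : ∀ (acc : String) (rest : List String),
    pvKey acc = none → (∀ x ∈ g, pvKey x = none) →
    pvFuse acc (g ++ rest) = (acc :: g) ++ pvFuseAll rest := by
  induction g with
  | nil =>
    intro acc rest hacc _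
    cases rest with
    | nil => simp [pvFuse, pvFuseAll]
    | cons r rs =>
      rw [List.nil_append, pvFuse_cons, mergeA_none_of_prev_none acc r hacc]
      rfl
  | cons c g' ih =>
    intro acc rest hacc hg
    rw [List.cons_append, pvFuse_cons, mergeA_none_of_prev_none acc c hacc]
    rw [ih c rest (hg c (by simp)) (fun x hx => hg x (List.mem_cons_of_mem _ hx))]
    rfl

lemma dropWhile_head_false {α : Type} (p : α → Bool) (l : List α) :
    ∀ r rs, l.dropWhile p = r :: rs → p r = false := by
  induction l with
  | nil => intro r rs h; simp [List.dropWhile] at h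
  | cons a l' ih =>
    intro r rs h
    rw [List.dropWhile_cons] at h
    split at h
    · exact ih r rs h
    · injection h with h1 _
      subst h1
      simp_all

lemma fuseAll_eq_aux (n : Nat) : ∀ (cmds : List String), cmds.length ≤ n →
    pvFuseAll cmds = ((pvGroupRuns cmds).map pvProcessGroup).flatten := by
  induction n with
  | zero =>
    intro cmds h
    have : cmds = [] := List.length_eq_zero_iff.1 (Nat.le_zero.1 h)
    subst this
    simp [pvFuseAll, pvGroupRuns]
  | succ n ih =>
    intro cmds h
    cases cmds with
    | nil => simp [pvFuseAll, pvGroupRuns]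
    | cons c cs =>
      rw [pvGroupRuns]
      have hsplit : cs.takeWhile (fun x => pvKey x == pvKey c) ++
          cs.dropWhile (fun x => pvKey x == pvKey c) = cs := List.takeWhile_append_dropWhile
      have hlen : (cs.dropWhile (fun x => pvKey x == pvKey c)).length ≤ n :=
        le_trans (List.length_dropWhile_le _ _) (by simpa using Nat.le_of_succ_le_succ h)
      have hg : ∀ x ∈ cs.takeWhile (fun x => pvKey x == pvKey c), pvKey x = pvKey c := by
        intro x hx
        have := List.mem_takeWhile_imp hx
        simpa using this
      have hrest : ∀ r rs, cs.dropWhile (fun x => pvKey x == pvKey c) = r :: rs →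
          pvKey r ≠ pvKey c := by
        intro r rs hr
        have := dropWhile_head_false _ cs r rs hr
        simpa using this
      revert hsplit hlen hg hrest
      generalize cs.takeWhile (fun x => pvKey x == pvKey c) = G
      generalize cs.dropWhile (fun x => pvKey x == pvKey c) = R
      intro hsplit hlen hg hrest
      show pvFuseAll (c :: cs) = pvProcessGroup (pvKey c, c :: G) ++ (List.map pvProcessGroup (pvGroupRuns R)).flatten
      rw [← ih R hlen]
      show pvFuse c cs = pvProcessGroup (pvKey c, c :: G) ++ pvFuseAll R
      rw [← hsplit]
      cases hk : pvKey c with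
      | none =>
        rw [fuse_none_group G c R hk (fun x hx => (hg x hx).trans hk)]
        rfl
      | some k =>
        rw [fuse_group G c k R (key_cases c k hk) hk
          (fun x hx => (hg x hx).trans hk)
          (fun r rs hr h' => hrest r rs hr (h'.trans hk.symm))]
        rfl

lemma compressA_eq_fuseAll (commands : List String) :
    compress_commands_py commands = pvFuseAll commands := by
  cases commands with
  | nil => rfl
  | cons c0 rest =>
    have h0 : compress_commands_py (c0 :: rest) = (rest.foldl pvStepA [c0]).reverse := rfl
    rw [h0, foldA_eq rest c0 []]
    rfl

-- ===== VERDICT (by name: the statement is the Claim_ definition above) =====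
theorem compress_commands_py_spec : Claim_equal_compress_commands_py := by
  intro commands _
  unfold Spec_compress_commands_py compress_commands_py_alt
  rw [compressA_eq_fuseAll]
  exact fuseAll_eq_aux commands.length commands le_rfl
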